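-- pv_equiv track=rewrite | github.com/heltonmaia/proj-question-generator | question_generator/questions/question_ch5_0051.py | analisar_numeros
-- ===== SOURCE A (Python) =====
-- from typing import List, Tuple
--
-- def analisar_numeros(lista_de_numeros: List[int]) -> Tuple[int, int, int]:
--     """
--     Analisa uma lista de números inteiros para contar pares, ímpares e calcular a soma total.
--
--     Args:
--         lista_de_numeros (List[int]): Uma lista de números inteiros.
--
--     Returns:
--         Tuple[int, int, int]: Uma tupla contendo a quantidade de números pares,
--                               a quantidade de números ímpares e a soma total dos números.
--     """
--     quantidade_pares = 0
--     quantidade_impares = 0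
--     soma_total = 0
--
--     for numero in lista_de_numeros:
--         soma_total += numero
--         if numero % 2 == 0:
--             quantidade_pares += 1
--         else:
--             quantidade_impares += 1
--
--     return quantidade_pares, quantidade_impares, soma_total
-- ===== SOURCE B (Python) =====
-- from typing import List, Tuple
--
-- def analisar_numeros(lista_de_numeros: List[int]) -> Tuple[int, int, int]:
--     # Divide-and-conquer: split the list in half, analyse each half recursively,
--     # and combine the (pares, impares, soma) triples component-wise.
--     if not lista_de_numeros:
--         return (0, 0, 0)
--     if len(lista_de_numeros) == 1:
--         n = lista_de_numeros[0]
--         return (1, 0, n) if n % 2 == 0 else (0, 1, n)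
--     mid = len(lista_de_numeros) // 2
--     p1, i1, s1 = analisar_numeros(lista_de_numeros[:mid])
--     p2, i2, s2 = analisar_numeros(lista_de_numeros[mid:])
--     return (p1 + p2, i1 + i2, s1 + s2)
-- ===== Notes on version B (the rewrite author's own statement) =====
-- stated objective: alternative
-- what changed: Replaces A's single fused accumulator loop with a recursive divide-and-conquer: split the list at the midpoint, analyse each half recursively, and combine the (even-count, odd-count, sum) triples component-wise; correctness rests on the additivity of all three statistics over concatenation.
import Mathlib
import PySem

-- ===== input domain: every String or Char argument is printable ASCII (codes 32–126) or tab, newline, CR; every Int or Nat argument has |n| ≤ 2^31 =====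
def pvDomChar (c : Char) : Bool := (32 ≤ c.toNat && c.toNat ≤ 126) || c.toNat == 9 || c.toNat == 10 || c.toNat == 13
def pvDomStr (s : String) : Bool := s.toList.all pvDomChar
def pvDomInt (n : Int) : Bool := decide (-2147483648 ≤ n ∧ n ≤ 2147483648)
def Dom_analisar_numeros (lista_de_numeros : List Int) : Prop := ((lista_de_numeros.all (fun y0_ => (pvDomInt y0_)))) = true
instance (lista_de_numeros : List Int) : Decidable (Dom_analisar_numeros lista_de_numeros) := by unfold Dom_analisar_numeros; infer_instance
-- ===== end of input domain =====

-- B replaces A's single fused accumulator loop by a divide-and-conquer recursion (split at the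
-- midpoint, combine the two (pares, impares, soma) triples component-wise); same results, different decomposition.

-- ===== PORT A =====
-- A's for-loop over (pares, impares, soma), branch order as in the source.
def analisarLoopA : List Int → Int → Int → Int → Int × Int × Int
  | [], quantidade_pares, quantidade_impares, soma_total =>
      (quantidade_pares, quantidade_impares, soma_total)
  | numero :: rest, quantidade_pares, quantidade_impares, soma_total =>
      let soma_total := soma_total + numero
      if PySem.Int.mod numero 2 = 0 then
        analisarLoopA rest (quantidade_pares + 1) quantidade_impares soma_total
      else
        analisarLoopA rest quantidade_pares (quantidade_impares + 1) soma_total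

def analisar_numeros (lista_de_numeros : List Int) : Int × Int × Int :=
  analisarLoopA lista_de_numeros 0 0 0

-- ===== PORT B =====
-- Source B's divide-and-conquer: [] and singleton base cases, then slice at mid = len // 2 and recurse
-- on both halves. The Nat fuel (an upper bound on the list length) only makes the recursion
-- structural; it is never exhausted when started at l.length.
def analisarDC : Nat → List Int → Int × Int × Int
  | _, [] => (0, 0, 0)
  | _, [n] => if PySem.Int.mod n 2 = 0 then (1, 0, n) else (0, 1, n)
  | 0, _ => (0, 0, 0)  -- unreachable with fuel ≥ length
  | fuel + 1, l =>
      let mid := l.length / 2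
      let r1 := analisarDC fuel (l.take mid)
      let r2 := analisarDC fuel (l.drop mid)
      (r1.1 + r2.1, r1.2.1 + r2.2.1, r1.2.2 + r2.2.2)

def analisar_numeros_alt (lista_de_numeros : List Int) : Int × Int × Int :=
  analisarDC lista_de_numeros.length lista_de_numeros

-- ===== PRECONDITION & SPEC =====
def Spec_analisar_numeros (lista_de_numeros : List Int) (out : Int × Int × Int) : Prop := out = analisar_numeros_alt lista_de_numeros
instance (lista_de_numeros : List Int) (out : Int × Int × Int) : Decidable (Spec_analisar_numeros lista_de_numeros out) := by unfold Spec_analisar_numeros; infer_instance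

-- ===== CLAIM =====
def Claim_equal_analisar_numeros : Prop := ∀ (lista_de_numeros : List Int), Dom_analisar_numeros lista_de_numeros → Spec_analisar_numeros lista_de_numeros (analisar_numeros lista_de_numeros)

-- ===== LEMMAS AND PROOFS =====

-- The common closed form: even count, odd count, sum.
def pvEven (n : Int) : Bool := decide (PySem.Int.mod n 2 = 0)

def pvStats (l : List Int) : Int × Int × Int :=
  (((l.filter pvEven).length : Int), ((l.filter (fun n => !pvEven n)).length : Int), l.sum)

theorem analisarLoopA_eq (l : List Int) (p i s : Int) :
    analisarLoopA l p i s = (p + (pvStats l).1, i + (pvStats l).2.1, s + (pvStats l).2.2) := by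
  induction l generalizing p i s with
  | nil => simp [analisarLoopA, pvStats]
  | cons n t ih =>
      show (if PySem.Int.mod n 2 = 0 then analisarLoopA t (p+1) i (s+n)
            else analisarLoopA t p (i+1) (s+n)) = _
      by_cases h : PySem.Int.mod n 2 = 0
      · have he : pvEven n = true := by unfold pvEven; rw [h]; decide
        rw [if_pos h, ih]
        simp only [pvStats, List.filter_cons, he, Bool.not_true, if_true,
          Bool.false_eq_true, if_false, List.length_cons, List.sum_cons, Prod.mk.injEq]
        refine ⟨?_, ?_, ?_⟩ <;> push_cast <;> ring
      · have he : pvEven n = false := by unfold pvEven; exact decide_eq_false h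
        rw [if_neg h, ih]
        simp only [pvStats, List.filter_cons, he, Bool.not_false, if_true,
          Bool.false_eq_true, if_false, List.length_cons, List.sum_cons, Prod.mk.injEq]
        refine ⟨?_, ?_, ?_⟩ <;> push_cast <;> ring

theorem pvStats_append (a b : List Int) :
    pvStats (a ++ b) = ((pvStats a).1 + (pvStats b).1, (pvStats a).2.1 + (pvStats b).2.1,
                        (pvStats a).2.2 + (pvStats b).2.2) := by
  simp only [pvStats, List.filter_append, List.length_append, List.sum_append, Prod.mk.injEq]
  refine ⟨?_, ?_, ?_⟩ <;> push_cast <;> ring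

theorem dc_single (fuel : Nat) (n : Int) : analisarDC fuel [n] = pvStats [n] := by
  by_cases h : PySem.Int.mod n 2 = 0
  · have he : pvEven n = true := by unfold pvEven; rw [h]; decide
    have hd : (2 : Int) ∣ n := (PySem.Int.mod_eq_zero_iff_dvd n 2).mp h
    cases fuel <;> simp [analisarDC, pvStats, he, hd]
  · have he : pvEven n = false := by unfold pvEven; exact decide_eq_false h
    have hd : ¬ (2 : Int) ∣ n := fun d => h ((PySem.Int.mod_eq_zero_iff_dvd n 2).mpr d)
    cases fuel <;> simp [analisarDC, pvStats, he, hd]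

theorem dc_eq (fuel : Nat) : ∀ l : List Int, l.length ≤ fuel + 1 → analisarDC fuel l = pvStats l := by
  induction fuel with
  | zero =>
      intro l h
      rcases l with _ | ⟨x, _ | ⟨y, t⟩⟩
      · simp [analisarDC, pvStats]
      · exact dc_single 0 x
      · simp at h
  | succ f ih =>
      intro l h
      rcases l with _ | ⟨x, _ | ⟨y, t⟩⟩
      · simp [analisarDC, pvStats]
      · exact dc_single (f + 1) x
      · show (let mid := (x :: y :: t).length / 2
              let r1 := analisarDC f ((x :: y :: t).take mid)
              let r2 := analisarDC f ((x :: y :: t).drop mid)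
              (r1.1 + r2.1, r1.2.1 + r2.2.1, r1.2.2 + r2.2.2)) = pvStats (x :: y :: t)
        have hlen : (x :: y :: t).length = t.length + 2 := by simp
        have h1 : ((x :: y :: t).take ((x :: y :: t).length / 2)).length ≤ f + 1 := by
          simp only [List.length_take, hlen] at *; omega
        have h2 : ((x :: y :: t).drop ((x :: y :: t).length / 2)).length ≤ f + 1 := by
          simp only [List.length_drop, hlen] at *; omega
        simp only [ih _ h1, ih _ h2]
        have hsplit := pvStats_append ((x :: y :: t).take ((x :: y :: t).length / 2))
          ((x :: y :: t).drop ((x :: y :: t).length / 2))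
        rw [List.take_append_drop] at hsplit
        rw [hsplit]

theorem alt_eq_stats (l : List Int) : analisar_numeros_alt l = pvStats l :=
  dc_eq l.length l (by omega)

-- ===== VERDICT =====
theorem analisar_numeros_spec : Claim_equal_analisar_numeros := by
  intro l _
  unfold Spec_analisar_numeros analisar_numeros
  rw [analisarLoopA_eq, alt_eq_stats]
  simp [pvStats]
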